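-- pv_equiv track=rewrite | github.com/Rxcthefirst/RDF-StarBase | src/rdf_starbase/storage/shacl.py | _tokenize_turtle
-- ===== SOURCE A (Python) =====
-- def _tokenize_turtle(text: str) -> list[str]:
--     """Tokenize Turtle text."""
--     tokens = []
--     i = 0
--
--     while i < len(text):
--         # Skip whitespace
--         while i < len(text) and text[i] in " \t\n\r":
--             i += 1
--
--         if i >= len(text):
--             break
--
--         # IRI
--         if text[i] == "<":
--             end = text.find(">", i)
--             if end != -1:
--                 tokens.append(text[i:end + 1])
--                 i = end + 1
--                 continue
--
--         # Literal
--         if text[i] == '"':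
--             i += 1
--             start = i
--             while i < len(text) and text[i] != '"':
--                 if text[i] == "\\" and i + 1 < len(text):
--                     i += 2
--                 else:
--                     i += 1
--             if i < len(text):
--                 tokens.append('"' + text[start:i] + '"')
--                 i += 1
--             continue
--
--         # Special characters
--         if text[i] in ";,.[]()":
--             tokens.append(text[i])
--             i += 1
--             continue
--
--         # ^^ for datatype
--         if text[i:i + 2] == "^^":
--             tokens.append("^^")
--             i += 2
--             continue
--
--         # @prefix already removed, handle @language tags
--         if text[i] == "@":
--             start = i
--             i += 1
--             while i < len(text) and text[i].isalpha():
--                 i += 1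
--             tokens.append(text[start:i])
--             continue
--
--         # Prefixed name or keyword
--         start = i
--         while i < len(text) and text[i] not in " \t\n\r;,.[]()" and text[i:i + 2] != "^^":
--             i += 1
--         if i > start:
--             tokens.append(text[start:i])
--
--     return tokens
-- ===== SOURCE B (Python) =====
-- import re
--
-- # One compiled master pattern, ordered alternatives mirroring the grammar:
-- # whitespace run, IRI, terminated literal, unterminated literal (consumes the
-- # rest, yields nothing), special char, ^^, @language, name (stops before ^^).
-- _TOKEN_RE = re.compile(
--     r'[ \t\n\r]+'
--     r'|(<[^>]*>)'
--     r'|("(?:\\[\s\S]|[^"\\])*")'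
--     r'|"[\s\S]*'
--     r'|([;,.\[\]()])'
--     r'|(\^\^)'
--     r'|(@[A-Za-z]*)'
--     r'|((?:[^ \t\n\r;,.\[\]()^]|\^(?!\^))+)'
-- )
--
--
-- def _tokenize_turtle(text: str) -> list[str]:
--     tokens = []
--     for m in _TOKEN_RE.finditer(text):
--         for g in m.groups():
--             if g is not None:
--                 tokens.append(g)
--                 break
--     return tokens
-- ===== Notes on version B (the rewrite author's own statement) =====
-- stated objective: idiomatic
-- what changed: Replaced the hand-rolled per-character cursor/branch state machine by a regex-driven tokenizer: one compiled master pattern of ordered alternatives (whitespace, IRI, literal, unterminated literal, special char, ^^, language tag, name) scanned with finditer, appending each captured group.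
import Mathlib
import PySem

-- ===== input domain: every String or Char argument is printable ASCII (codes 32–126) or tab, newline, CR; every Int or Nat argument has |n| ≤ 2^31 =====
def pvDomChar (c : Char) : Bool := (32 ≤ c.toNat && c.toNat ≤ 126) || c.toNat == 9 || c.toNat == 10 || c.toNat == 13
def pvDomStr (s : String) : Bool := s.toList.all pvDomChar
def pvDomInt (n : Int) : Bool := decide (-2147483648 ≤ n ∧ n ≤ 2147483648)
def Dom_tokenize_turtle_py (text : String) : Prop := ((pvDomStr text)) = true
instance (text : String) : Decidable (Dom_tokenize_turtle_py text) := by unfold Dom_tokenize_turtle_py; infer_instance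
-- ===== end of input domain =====

-- B replaces A's hand-rolled per-character cursor/branch state machine by one
-- master token pattern of ordered alternatives scanned left to right
-- (objective: idiomatic).
-- Every loop below carries an explicit fuel argument that merely bounds the
-- number of iterations (each Python loop advances its cursor / shortens its
-- list, so the fuel chosen at the call site is never exhausted); this is a
-- totality guard only, not part of either algorithm.

-- Shared character classes (" \t\n\r" and ";,.[]()" of the Python source).
def pvIsWs (c : Char) : Bool := c = ' ' || c = '\t' || c = '\n' || c = '\r'
def pvIsSpecial (c : Char) : Bool :=
  c = ';' || c = ',' || c = '.' || c = '[' || c = ']' || c = '(' || c = ')'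

-- ===== PORT A =====
-- A works with an integer cursor i into the text; we port it index for index
-- over t := text.toList, reading t[i] as t.getD i ' ' (every read is guarded
-- by i < t.length, so the default is never used).

-- `while i < len(text) and text[i] in " \t\n\r": i += 1`
def pvSkipWs (t : List Char) : Nat → Nat → Nat
  | 0, i => i
  | fuel + 1, i =>
    if i < t.length ∧ pvIsWs (t.getD i ' ') then pvSkipWs t fuel (i + 1) else i

-- `text.find(">", i)` (none = Python's -1)
def pvFindGt (t : List Char) : Nat → Nat → Option Nat
  | 0, _ => none
  | fuel + 1, i =>
    if i < t.length then
      if t.getD i ' ' = '>' then some i else pvFindGt t fuel (i + 1)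
    else none

-- the literal-scanning `while` loop; returns the final i
def pvLitEnd (t : List Char) : Nat → Nat → Nat
  | 0, i => i
  | fuel + 1, i =>
    if i < t.length then
      if t.getD i ' ' = '"' then i
      else if t.getD i ' ' = '\\' ∧ i + 1 < t.length then pvLitEnd t fuel (i + 2)
      else pvLitEnd t fuel (i + 1)
    else i

-- `while i < len(text) and text[i].isalpha(): i += 1` (isalpha exact on the ASCII domain)
def pvAlphaEnd (t : List Char) : Nat → Nat → Nat
  | 0, i => i
  | fuel + 1, i =>
    if i < t.length ∧ PySem.Chars.isalpha (t.getD i ' ') then pvAlphaEnd t fuel (i + 1)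
    else i

-- the prefixed-name `while` loop; `text[i:i+2] == "^^"` ported as the
-- equivalent i+1 < len ∧ t[i] = '^' ∧ t[i+1] = '^'
def pvNameEnd (t : List Char) : Nat → Nat → Nat
  | 0, i => i
  | fuel + 1, i =>
    if i < t.length then
      if pvIsWs (t.getD i ' ') ∨ pvIsSpecial (t.getD i ' ')
          ∨ (t.getD i ' ' = '^' ∧ i + 1 < t.length ∧ t.getD (i + 1) ' ' = '^') then i
      else pvNameEnd t fuel (i + 1)
    else i

-- the outer `while i < len(text)` loop of A, token list accumulated in order;
-- slices text[a:b] (always 0 ≤ a ≤ b ≤ len here) ported as (t.drop a).take (b-a);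
-- the inner loops each scan at most t.length positions, so fuel t.length is enough
def pvMainA (t : List Char) : Nat → Nat → List (List Char)
  | 0, _ => []
  | fuel + 1, i =>
    if hj : pvSkipWs t t.length i < t.length then
      if h1 : t.getD (pvSkipWs t t.length i) ' ' = '<'
          ∧ (pvFindGt t t.length (pvSkipWs t t.length i)).isSome then
        -- IRI with a closing '>': token text[j:end+1], cursor end+1
        ((t.drop (pvSkipWs t t.length i)).take
            ((pvFindGt t t.length (pvSkipWs t t.length i)).getD 0 + 1 - pvSkipWs t t.length i))
          :: pvMainA t fuel ((pvFindGt t t.length (pvSkipWs t t.length i)).getD 0 + 1)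
      else if h2 : t.getD (pvSkipWs t t.length i) ' ' = '"' then
        -- literal: scan from j+1 to the closing quote (or the end)
        if pvLitEnd t t.length (pvSkipWs t t.length i + 1) < t.length then
          ('"' :: (t.drop (pvSkipWs t t.length i + 1)).take
              (pvLitEnd t t.length (pvSkipWs t t.length i + 1) - (pvSkipWs t t.length i + 1)) ++ ['"'])
            :: pvMainA t fuel (pvLitEnd t t.length (pvSkipWs t t.length i + 1) + 1)
        else pvMainA t fuel (pvLitEnd t t.length (pvSkipWs t t.length i + 1))   -- unterminated: no token
      else if h3 : pvIsSpecial (t.getD (pvSkipWs t t.length i) ' ') then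
        [t.getD (pvSkipWs t t.length i) ' '] :: pvMainA t fuel (pvSkipWs t t.length i + 1)
      else if h4 : t.getD (pvSkipWs t t.length i) ' ' = '^' ∧ pvSkipWs t t.length i + 1 < t.length
          ∧ t.getD (pvSkipWs t t.length i + 1) ' ' = '^' then
        ['^', '^'] :: pvMainA t fuel (pvSkipWs t t.length i + 2)
      else if h5 : t.getD (pvSkipWs t t.length i) ' ' = '@' then
        ('@' :: (t.drop (pvSkipWs t t.length i + 1)).take
            (pvAlphaEnd t t.length (pvSkipWs t t.length i + 1) - (pvSkipWs t t.length i + 1)))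
          :: pvMainA t fuel (pvAlphaEnd t t.length (pvSkipWs t t.length i + 1))
      else
        -- prefixed name or keyword (also a '<' with no closing '>' falls here)
        if pvNameEnd t t.length (pvSkipWs t t.length i) > pvSkipWs t t.length i then
          ((t.drop (pvSkipWs t t.length i)).take
              (pvNameEnd t t.length (pvSkipWs t t.length i) - pvSkipWs t t.length i))
            :: pvMainA t fuel (pvNameEnd t t.length (pvSkipWs t t.length i))
        else pvMainA t fuel (pvNameEnd t t.length (pvSkipWs t t.length i))
    else []

-- every outer iteration advances the cursor, so fuel len+1 is never exhausted
def tokenize_turtle_py (text : String) : List String :=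
  (pvMainA text.toList (text.toList.length + 1) 0).map (fun cs => String.ofList cs)

-- ===== PORT B =====
-- Source B matches one compiled pattern of ordered alternatives repeatedly at the
-- current position (re.finditer is exactly this left-to-right scan for this
-- pattern, which can match at every position).  Each alternative is a
-- deterministic greedy scan and is ported as such, in Source B's order:
-- [ \t\n\r]+ | <[^>]*> | "(\\.|[^"\])*" | "rest | special | ^^ | @alpha* | name+.

-- `"(?:\\[\s\S]|[^"\\])*"` : (content, rest after the closing quote); none if
-- the closing quote is missing (then the `"[\s\S]*` alternative applies).
def pvLitScan : List Char → Option (List Char × List Char)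
  | [] => none
  | '"' :: r => some ([], r)
  | '\\' :: c :: r => (pvLitScan r).map (fun p => ('\\' :: c :: p.1, p.2))
  | c :: r => (pvLitScan r).map (fun p => (c :: p.1, p.2))

-- `(?:[^ \t\n\r;,.\[\]()^]|\^(?!\^))+` : maximal run of name characters,
-- a single '^' allowed unless it starts "^^"
def pvNameTake : List Char → List Char
  | '^' :: '^' :: _ => []
  | c :: r => if pvIsWs c || pvIsSpecial c then [] else c :: pvNameTake r
  | [] => []

-- the finditer loop: match the alternatives in order at the head, emit the
-- captured group (if any), continue after the match; every match consumes at
-- least one character, so fuel = the list's length is never exhausted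
def pvScanB : Nat → List Char → List (List Char)
  | 0, _ => []
  | _ + 1, [] => []
  | fuel + 1, c :: r =>
    if pvIsWs c then
      pvScanB fuel (r.dropWhile pvIsWs)                              -- whitespace: no group
    else if c = '<' ∧ r.dropWhile (· ≠ '>') ≠ [] then
      ('<' :: r.takeWhile (· ≠ '>') ++ ['>']) :: pvScanB fuel (r.dropWhile (· ≠ '>')).tail
    else if c = '"' then
      match pvLitScan r with
      | some (a, rest) => ('"' :: a ++ ['"']) :: pvScanB fuel rest   -- terminated literal
      | none => []                                                   -- `"[\s\S]*`: rest consumed, no group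
    else if pvIsSpecial c then
      [c] :: pvScanB fuel r
    else if c = '^' ∧ r.head? = some '^' then
      ['^', '^'] :: pvScanB fuel r.tail
    else if c = '@' then
      ('@' :: r.takeWhile PySem.Chars.isalpha) :: pvScanB fuel (r.dropWhile PySem.Chars.isalpha)
    else
      (c :: pvNameTake r) :: pvScanB fuel (r.drop (pvNameTake r).length)

def tokenize_turtle_py_alt (text : String) : List String :=
  (pvScanB text.toList.length text.toList).map (fun cs => String.ofList cs)

-- ===== PRECONDITION & SPEC =====
def Spec_tokenize_turtle_py (text : String) (out : List String) : Prop := out = tokenize_turtle_py_alt text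
instance (text : String) (out : List String) : Decidable (Spec_tokenize_turtle_py text out) := by unfold Spec_tokenize_turtle_py; infer_instance

-- ===== CLAIM (what is proved, stated in full; the proofs are below) =====
def Claim_equal_tokenize_turtle_py : Prop := ∀ (text : String), Dom_tokenize_turtle_py text → Spec_tokenize_turtle_py text (tokenize_turtle_py text)

-- ===== LEMMAS AND PROOFS =====

-- small generic list facts
theorem pv_take_takeWhile (p : Char → Bool) (l : List Char) :
    l.take (l.takeWhile p).length = l.takeWhile p := by
  induction l with
  | nil => rfl
  | cons c r ih => by_cases h : p c <;> simp [List.takeWhile_cons, h, ih]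

theorem pv_dropWhile_head_eq (p : Char → Bool) (l : List Char) (d : Char) (ds : List Char)
    (h : l.dropWhile p = d :: ds) : p d = false := by
  induction l with
  | nil => simp at h
  | cons c r ih =>
    rw [List.dropWhile_cons] at h
    by_cases hc : p c
    · rw [if_pos hc] at h; exact ih h
    · rw [if_neg hc] at h
      cases h; simpa using hc

theorem pv_takeWhile_dropWhile (p : Char → Bool) (l : List Char) :
    (l.dropWhile p).takeWhile p = [] := by
  cases h : l.dropWhile p with
  | nil => rfl
  | cons d ds => rw [List.takeWhile_cons_of_neg (by simp [pv_dropWhile_head_eq p l d ds h])]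

theorem pv_getD_iff (t : List Char) (k : Nat) (x : Char) :
    t[k]? = some x ↔ k < t.length ∧ t.getD k ' ' = x := by
  constructor
  · intro h
    obtain ⟨hk, he⟩ := List.getElem?_eq_some_iff.mp h
    exact ⟨hk, by simp [List.getD_eq_getElem?_getD, h]⟩
  · rintro ⟨hk, he⟩
    rw [List.getElem?_eq_some_iff]
    refine ⟨hk, ?_⟩
    rw [List.getD_eq_getElem?_getD, List.getElem?_eq_getElem hk] at he
    simpa using he

theorem pv_drop_cons (t : List Char) (i : Nat) (c : Char) (r : List Char)
    (h : t.drop i = c :: r) :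
    i < t.length ∧ t.getD i ' ' = c ∧ t.drop (i + 1) = r := by
  have hh : t[i]? = some c := by rw [← List.head?_drop, h]; rfl
  obtain ⟨hk, he⟩ := (pv_getD_iff t i c).mp hh
  refine ⟨hk, he, ?_⟩
  have ht : (t.drop i).tail = t.drop (i + 1) := List.tail_drop ..
  rw [← ht, h]
  rfl

theorem pv_take_nameTake (l : List Char) : l.take (pvNameTake l).length = pvNameTake l := by
  fun_induction pvNameTake l
  · rfl
  · simp
  · rename_i ih
    simp [ih]
  · rfl

theorem pvLitScan_rest_le (l a rest : List Char)
    (h : pvLitScan l = some (a, rest)) : rest.length ≤ l.length := by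
  fun_induction pvLitScan l generalizing a rest
  case case1 => simp [pvLitScan] at h
  case case2 =>
    simp only [Option.some.injEq, Prod.mk.injEq] at h
    simp [← h.2]
  case case3 ih =>
    rw [Option.map_eq_some_iff] at h
    obtain ⟨⟨a', r'⟩, hh, hr⟩ := h
    have := ih a' r' hh
    simp only [Prod.mk.injEq] at hr
    simp [← hr.2]
    omega
  case case4 ih =>
    rw [Option.map_eq_some_iff] at h
    obtain ⟨⟨a', r'⟩, hh, hr⟩ := h
    have := ih a' r' hh
    simp only [Prod.mk.injEq] at hr
    simp [← hr.2]
    omega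

theorem pv_nameTake_cons (c : Char) (r : List Char) (hw : ¬ pvIsWs c = true)
    (hsp : ¬ pvIsSpecial c = true) (hht : ¬ (c = '^' ∧ r.head? = some '^')) :
    pvNameTake (c :: r) = c :: pvNameTake r := by
  rw [pvNameTake.eq_2 c r (by
    intro tail h1 h2
    exact hht ⟨h1, by rw [h2]; rfl⟩)]
  rw [if_neg (by
    intro hor
    rcases Bool.or_eq_true_iff.mp hor with h | h
    · exact hw h
    · exact hsp h)]

theorem pv_drop_takeWhile (p : Char → Bool) (l : List Char) :
    l.drop (l.takeWhile p).length = l.dropWhile p := by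
  induction l with
  | nil => rfl
  | cons c r ih =>
    by_cases h : p c <;>
      simp [List.takeWhile_cons, List.dropWhile_cons, h, ih]

theorem pvScanB_nil (fuel : Nat) : pvScanB fuel ([] : List Char) = [] := by
  cases fuel <;> rfl

-- characterizations of A's fueled index loops by B's list scans
theorem pvSkipWs_char (t : List Char) (fuel : Nat) :
    ∀ i, t.length - i ≤ fuel →
      pvSkipWs t fuel i = i + ((t.drop i).takeWhile pvIsWs).length := by
  induction fuel with
  | zero =>
    intro i h
    have hd : t.drop i = [] := List.drop_eq_nil_of_le (by omega)
    rw [hd]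
    rfl
  | succ fuel ih =>
    intro i h
    rcases hd : t.drop i with - | ⟨c, r⟩
    · have := List.drop_eq_nil_iff.mp hd
      rw [pvSkipWs, if_neg (by omega)]
      simp
    · obtain ⟨hk, he, hr⟩ := pv_drop_cons t i c r hd
      by_cases hw : pvIsWs c
      · rw [pvSkipWs, if_pos ⟨hk, by rw [he]; exact hw⟩, ih (i + 1) (by omega), hr,
          List.takeWhile_cons_of_pos hw]
        simp
        omega
      · rw [pvSkipWs, if_neg (by rintro ⟨-, hws⟩; rw [he] at hws; exact hw hws),
          List.takeWhile_cons_of_neg hw]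
        rfl

theorem pvFindGt_char (t : List Char) (fuel : Nat) :
    ∀ i, t.length - i ≤ fuel →
      pvFindGt t fuel i = if (t.drop i).dropWhile (· ≠ '>') = [] then none
        else some (i + ((t.drop i).takeWhile (· ≠ '>')).length) := by
  induction fuel with
  | zero =>
    intro i h
    have hd : t.drop i = [] := List.drop_eq_nil_of_le (by omega)
    rw [hd]
    rfl
  | succ fuel ih =>
    intro i h
    rcases hd : t.drop i with - | ⟨c, r⟩
    · have := List.drop_eq_nil_iff.mp hd
      rw [pvFindGt, if_neg (by omega)]
      rfl
    · obtain ⟨hk, he, hr⟩ := pv_drop_cons t i c r hd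
      rw [pvFindGt, if_pos hk, he]
      by_cases hc : c = '>'
      · subst hc
        simp [List.dropWhile_cons, List.takeWhile_cons]
      · rw [if_neg hc, ih (i + 1) (by omega), hr]
        simp only [List.dropWhile_cons, List.takeWhile_cons]
        have hcb : (c ≠ '>' : Bool) = true := by simpa using hc
        rw [if_pos hcb, if_pos hcb]
        split
        · rfl
        · simp; omega

theorem pvAlphaEnd_char (t : List Char) (fuel : Nat) :
    ∀ i, t.length - i ≤ fuel →
      pvAlphaEnd t fuel i = i + ((t.drop i).takeWhile PySem.Chars.isalpha).length := by
  induction fuel with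
  | zero =>
    intro i h
    have hd : t.drop i = [] := List.drop_eq_nil_of_le (by omega)
    rw [hd]
    rfl
  | succ fuel ih =>
    intro i h
    rcases hd : t.drop i with - | ⟨c, r⟩
    · have := List.drop_eq_nil_iff.mp hd
      rw [pvAlphaEnd, if_neg (by omega)]
      simp
    · obtain ⟨hk, he, hr⟩ := pv_drop_cons t i c r hd
      by_cases hc : PySem.Chars.isalpha c
      · rw [pvAlphaEnd, if_pos ⟨hk, by rw [he]; exact hc⟩, ih (i + 1) (by omega), hr,
          List.takeWhile_cons_of_pos hc]
        simp
        omega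
      · rw [pvAlphaEnd, if_neg (by rintro ⟨-, hca⟩; rw [he] at hca; exact hc hca),
          List.takeWhile_cons_of_neg hc]
        rfl

theorem pvNameEnd_char (t : List Char) (fuel : Nat) :
    ∀ i, t.length - i ≤ fuel →
      pvNameEnd t fuel i = i + (pvNameTake (t.drop i)).length := by
  induction fuel with
  | zero =>
    intro i h
    have hd : t.drop i = [] := List.drop_eq_nil_of_le (by omega)
    rw [hd]
    rfl
  | succ fuel ih =>
    intro i h
    rcases hd : t.drop i with - | ⟨c, r⟩
    · have := List.drop_eq_nil_iff.mp hd
      rw [pvNameEnd, if_neg (by omega)]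
      simp [pvNameTake]
    · obtain ⟨hk, he, hr⟩ := pv_drop_cons t i c r hd
      have hnext : ∀ x, (r.head? = some x) ↔ (i + 1 < t.length ∧ t.getD (i + 1) ' ' = x) := by
        intro x
        rw [← hr, List.head?_drop]
        exact pv_getD_iff t (i + 1) x
      by_cases hcar : c = '^' ∧ r.head? = some '^'
      · -- the "^^" stop, pvNameTake's first clause
        obtain ⟨hc1, hc2⟩ := hcar
        subst hc1
        obtain ⟨r2, hr2⟩ : ∃ r2, r = '^' :: r2 := by
          cases r with
          | nil => simp at hc2
          | cons a b => simp at hc2; subst hc2; exact ⟨b, rfl⟩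
        rw [pvNameEnd, if_pos hk, if_pos (Or.inr (Or.inr ⟨he, (hnext '^').mp hc2⟩)), hr2]
        rw [pvNameTake.eq_1]
        rfl
      · have hne : ∀ (tail : List Char), c = '^' → r = '^' :: tail → False := by
          intro tail h1 h2
          exact hcar ⟨h1, by rw [h2]; rfl⟩
        rw [pvNameTake.eq_2 c r hne]
        by_cases hstop : pvIsWs c || pvIsSpecial c
        · rw [if_pos hstop, pvNameEnd, if_pos hk, if_pos]
          · rfl
          · rcases Bool.or_eq_true_iff.mp hstop with h | h
            · exact Or.inl (by rw [he]; exact h)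
            · exact Or.inr (Or.inl (by rw [he]; exact h))
        · rw [if_neg hstop, pvNameEnd, if_pos hk, if_neg, ih (i + 1) (by omega), hr]
          · simp; omega
          · rw [he]
            intro hor
            rcases hor with h1 | h2 | h3
            · exact hstop (Bool.or_eq_true_iff.mpr (Or.inl h1))
            · exact hstop (Bool.or_eq_true_iff.mpr (Or.inr h2))
            · exact hcar ⟨h3.1, (hnext '^').mpr ⟨h3.2.1, h3.2.2⟩⟩

theorem pvLitEnd_none (t : List Char) (fuel : Nat) :
    ∀ i, t.length - i ≤ fuel → i ≤ t.length →
      pvLitScan (t.drop i) = none → pvLitEnd t fuel i = t.length := by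
  induction fuel with
  | zero =>
    intro i h hle hm
    rw [pvLitEnd]
    omega
  | succ fuel ih =>
    intro i h hle hm
    rcases hd : t.drop i with - | ⟨c, r⟩
    · have := List.drop_eq_nil_iff.mp hd
      rw [pvLitEnd, if_neg (by omega)]
      omega
    · obtain ⟨hk, he, hr⟩ := pv_drop_cons t i c r hd
      rw [hd] at hm
      by_cases hq : c = '"'
      · subst hq; rw [pvLitScan.eq_2] at hm; simp at hm
      · by_cases hb : c = '\\'
        · subst hb
          cases r with
          | nil =>
            rw [pvLitEnd, if_pos hk, if_neg (by rw [he]; exact hq),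
              if_neg (by
                rintro ⟨-, hlt⟩
                have := List.drop_eq_nil_iff.mp hr
                omega)]
            refine ih (i + 1) (by omega) (by omega) ?_
            rw [hr]; rfl
          | cons c2 r2 =>
            rw [pvLitScan.eq_3, Option.map_eq_none_iff] at hm
            obtain ⟨hk2, -, hr2⟩ := pv_drop_cons t (i + 1) c2 r2 hr
            rw [pvLitEnd, if_pos hk, if_neg (by rw [he]; exact hq),
              if_pos ⟨by rw [he], hk2⟩]
            refine ih (i + 2) (by omega) (by omega) ?_
            rw [hr2]; exact hm
        · rw [pvLitScan.eq_4 c r (by simp [hq]) (by intro c1 r1 hc _; exact hb hc),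
            Option.map_eq_none_iff] at hm
          rw [pvLitEnd, if_pos hk, if_neg (by rw [he]; exact hq),
            if_neg (by rintro ⟨hc, -⟩; rw [he] at hc; exact hb hc)]
          refine ih (i + 1) (by omega) (by omega) ?_
          rw [hr]; exact hm

theorem pvLitEnd_some (t : List Char) (fuel : Nat) :
    ∀ i a rest, t.length - i ≤ fuel → i ≤ t.length →
      pvLitScan (t.drop i) = some (a, rest) →
      pvLitEnd t fuel i = i + a.length ∧ i + a.length < t.length ∧
        (t.drop i).take a.length = a ∧ rest = t.drop (i + a.length + 1) := by
  induction fuel with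
  | zero =>
    intro i a rest h hle hm
    have hd : t.drop i = [] := List.drop_eq_nil_of_le (by omega)
    rw [hd] at hm
    simp [pvLitScan] at hm
  | succ fuel ih =>
    intro i a rest h hle hm
    rcases hd : t.drop i with - | ⟨c, r⟩
    · rw [hd] at hm; simp [pvLitScan] at hm
    · obtain ⟨hk, he, hr⟩ := pv_drop_cons t i c r hd
      rw [hd] at hm
      by_cases hq : c = '"'
      · subst hq
        rw [pvLitScan.eq_2] at hm
        obtain ⟨ha, hrest⟩ : [] = a ∧ r = rest := by
          constructor <;> [exact (Prod.mk.injEq .. ▸ Option.some.injEq .. ▸ hm :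
            ([] : List Char) = a ∧ r = rest).1;
            exact (Prod.mk.injEq .. ▸ Option.some.injEq .. ▸ hm :
            ([] : List Char) = a ∧ r = rest).2]
        subst ha; subst hrest
        rw [pvLitEnd, if_pos hk, if_pos (by rw [he])]
        simpa using ⟨hk, hr.symm⟩
      · by_cases hb : c = '\\'
        · subst hb
          cases r with
          | nil =>
            rw [pvLitScan.eq_4 '\\' [] (by simp) (by simp)] at hm
            simp [pvLitScan] at hm
          | cons c2 r2 =>
            rw [pvLitScan.eq_3, Option.map_eq_some_iff] at hm
            obtain ⟨⟨a', rest'⟩, hm', heq⟩ := hm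
            obtain ⟨ha, hrest⟩ : '\\' :: c2 :: a' = a ∧ rest' = rest := by
              simpa using heq
            obtain ⟨hk2, -, hr2⟩ := pv_drop_cons t (i + 1) c2 r2 hr
            have ihx := ih (i + 2) a' rest' (by omega) (by omega) (by rw [hr2]; exact hm')
            rw [pvLitEnd, if_pos hk, if_neg (by rw [he]; exact hq),
              if_pos ⟨by rw [he], hk2⟩]
            refine ⟨by rw [ihx.1, ← ha]; simp; omega,
              by have := ihx.2.1; rw [← ha]; simp; omega, ?_, ?_⟩
            · have hr2' : t.drop (i + 2) = r2 := by simpa using hr2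
              rw [← ha]
              simp only [List.length_cons, List.take_succ_cons]
              rw [← hr2', ihx.2.2.1]
            · rw [← hrest, ihx.2.2.2, ← ha]
              congr 1
              simp
              omega
        · rw [pvLitScan.eq_4 c r (by simp [hq]) (by intro c1 r1 hc _; exact hb hc),
            Option.map_eq_some_iff] at hm
          obtain ⟨⟨a', rest'⟩, hm', heq⟩ := hm
          obtain ⟨ha, hrest⟩ : c :: a' = a ∧ rest' = rest := by simpa using heq
          have ihx := ih (i + 1) a' rest' (by omega) (by omega) (by rw [hr]; exact hm')
          rw [pvLitEnd, if_pos hk, if_neg (by rw [he]; exact hq),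
            if_neg (by rintro ⟨hc, -⟩; rw [he] at hc; exact hb hc)]
          refine ⟨by rw [ihx.1, ← ha]; simp; omega,
            by have := ihx.2.1; rw [← ha]; simp; omega, ?_, ?_⟩
          · rw [← ha]
            simp only [List.length_cons, List.take_succ_cons]
            rw [← hr, ihx.2.2.1]
          · rw [← hrest, ihx.2.2.2, ← ha]
            congr 1
            simp
            omega

theorem pvMainA_eq (t : List Char) (i fA fB : Nat)
    (hA : t.length + 1 - i ≤ fA) (hB : (t.drop i).length ≤ fB) :
    pvMainA t fA i = pvScanB fB (t.drop i) := by
  rcases hd : t.drop i with - | ⟨c, r⟩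
  · have hn := List.drop_eq_nil_iff.mp hd
    rcases fA with - | g
    · rw [pvMainA, pvScanB_nil]
    · have hs : pvSkipWs t t.length i = i := by
        rw [pvSkipWs_char t t.length i (Nat.sub_le ..), hd]
        rfl
      rw [pvMainA, hs, dif_neg (by omega), pvScanB_nil]
  · obtain ⟨hk, he, hr⟩ := pv_drop_cons t i c r hd
    rcases fA with - | g
    · omega
    rcases fB with - | g2
    · rw [hd] at hB; simp at hB
    rw [hd] at hB
    simp only [List.length_cons] at hB
    have hrlen : r.length = t.length - (i + 1) := by
      rw [← hr, List.length_drop]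
    have hnext : ∀ x, (r.head? = some x) ↔ (i + 1 < t.length ∧ t.getD (i + 1) ' ' = x) := by
      intro x
      rw [← hr, List.head?_drop]
      exact pv_getD_iff t (i + 1) x
    have hskipchar := pvSkipWs_char t t.length i (Nat.sub_le ..)
    rw [hd] at hskipchar
    by_cases hw : pvIsWs c
    · -- whitespace alternative
      have hJ : pvSkipWs t t.length i = i + (r.takeWhile pvIsWs).length + 1 := by
        rw [hskipchar, List.takeWhile_cons_of_pos hw]
        simp
        omega
      have hdropJ : t.drop (pvSkipWs t t.length i) = r.dropWhile pvIsWs := by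
        rw [hJ, show i + (r.takeWhile pvIsWs).length + 1
            = (i + 1) + (r.takeWhile pvIsWs).length by omega, ← List.drop_drop, hr,
          pv_drop_takeWhile]
      have hid : pvSkipWs t t.length (pvSkipWs t t.length i) = pvSkipWs t t.length i := by
        rw [pvSkipWs_char t t.length (pvSkipWs t t.length i) (Nat.sub_le ..), hdropJ,
          pv_takeWhile_dropWhile]
        rfl
      have hstep : pvMainA t (g + 1) i = pvMainA t (g + 1) (pvSkipWs t t.length i) := by
        conv_lhs => rw [pvMainA]
        conv_rhs => rw [pvMainA, hid]
      rw [hstep, pvMainA_eq t (pvSkipWs t t.length i) (g + 1) g2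
        (by omega)
        (by
          rw [hdropJ]
          have := List.length_dropWhile_le (p := pvIsWs) (l := r)
          omega), hdropJ]
      conv_rhs => rw [pvScanB]
      rw [if_pos hw]
    · -- a token starts at c
      have hskip : pvSkipWs t t.length i = i := by
        rw [hskipchar, List.takeWhile_cons_of_neg hw]
        rfl
      rw [pvMainA, hskip, dif_pos hk, he]
      conv_rhs => rw [pvScanB]
      rw [if_neg hw]
      have hfg := pvFindGt_char t t.length i (Nat.sub_le ..)
      rw [hd] at hfg
      by_cases hlt : c = '<'
      · subst hlt
        rw [List.dropWhile_cons_of_pos (by decide), List.takeWhile_cons_of_pos (by decide)] at hfg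
        by_cases hne : r.dropWhile (· ≠ '>') = []
        · -- '<' with no closing '>': the name alternative in both
          rw [if_pos hne] at hfg
          rw [dif_neg (show ¬('<' = '<' ∧ (pvFindGt t t.length i).isSome) by
            rintro ⟨-, hs⟩; rw [hfg] at hs; simp at hs)]
          rw [dif_neg (show ¬(('<' : Char) = '"') by decide)]
          rw [dif_neg (show ¬(pvIsSpecial '<' = true) by decide)]
          rw [dif_neg (show ¬('<' = '^' ∧ i + 1 < t.length ∧ t.getD (i + 1) ' ' = '^') by
            rintro ⟨hh, -⟩; exact absurd hh (by decide))]
          rw [dif_neg (show ¬(('<' : Char) = '@') by decide)]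
          -- A is now at its name branch
          have hname := pvNameEnd_char t t.length i (Nat.sub_le ..)
          have hnt : pvNameTake ('<' :: r) = '<' :: pvNameTake r :=
            pv_nameTake_cons _ _ (by decide) (by decide)
              (by rintro ⟨hh, -⟩; exact absurd hh (by decide))
          rw [hd, hnt] at hname
          have hguard : i + ('<' :: pvNameTake r).length > i := by simp
          rw [hname, if_pos hguard]
          -- B falls through to its name alternative as well
          rw [if_neg (show ¬('<' = '<' ∧ r.dropWhile (· ≠ '>') ≠ []) by
            rintro ⟨-, hcon⟩; exact hcon hne)]
          rw [if_neg (show ¬(('<' : Char) = '"') by decide)]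
          rw [if_neg (show ¬(pvIsSpecial '<' = true) by decide)]
          rw [if_neg (show ¬('<' = '^' ∧ r.head? = some '^') by
            rintro ⟨hh, -⟩; exact absurd hh (by decide))]
          rw [if_neg (show ¬(('<' : Char) = '@') by decide)]
          congr 1
          · have harith : i + ('<' :: pvNameTake r).length - i
                = ('<' :: pvNameTake r).length := by omega
            rw [hd, harith, ← hnt, pv_take_nameTake ('<' :: r), hnt]
          · have hdst : t.drop (i + ('<' :: pvNameTake r).length)
                = r.drop (pvNameTake r).length := by
              rw [← hr, List.drop_drop]
              congr 1
              simp
              omega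
            rw [pvMainA_eq t (i + ('<' :: pvNameTake r).length) g g2
              (by simp only [List.length_cons]; omega)
              (by
                rw [hdst]
                have := List.length_drop (i := (pvNameTake r).length) (l := r)
                omega), hdst]
        · -- IRI with closing '>'
          rw [if_neg hne] at hfg
          obtain ⟨d, ds, hds⟩ : ∃ d ds, r.dropWhile (· ≠ '>') = d :: ds := by
            cases hx : r.dropWhile (· ≠ '>') with
            | nil => exact absurd hx hne
            | cons d ds => exact ⟨d, ds, rfl⟩
          have hdg : d = '>' := by
            have := pv_dropWhile_head_eq _ r d ds hds
            simpa using this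
          subst hdg
          have hs : (pvFindGt t t.length i).isSome := by rw [hfg]; rfl
          rw [dif_pos (show '<' = '<' ∧ (pvFindGt t t.length i).isSome from ⟨rfl, hs⟩)]
          rw [if_pos (show '<' = '<' ∧ r.dropWhile (· ≠ '>') ≠ [] from ⟨rfl, hne⟩)]
          have hsplit : r = r.takeWhile (· ≠ '>') ++ '>' :: ds := by
            conv_lhs => rw [← List.takeWhile_append_dropWhile (p := (· ≠ '>')) (l := r)]
            rw [hds]
          have hge : (pvFindGt t t.length i).getD 0
              = i + ('<' :: r.takeWhile (· ≠ '>')).length := by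
            rw [hfg]; rfl
          obtain ⟨tw, htw⟩ : ∃ tw, r.takeWhile (· ≠ '>') = tw := ⟨_, rfl⟩
          rw [htw] at hsplit hge ⊢
          congr 1
          · -- the IRI token
            rw [hge, hd]
            have harith : i + ('<' :: tw).length + 1 - i = tw.length + 2 := by
              simp; omega
            rw [harith]
            simp only [List.take_succ_cons]
            have htk : r.take (tw.length + 1) = tw ++ ['>'] := by
              conv_lhs => rw [hsplit]
              rw [List.take_length_add_append]
              rfl
            rw [htk]
            rfl
          · -- after the IRI
            rw [hge]
            have h1 : t.drop (i + ('<' :: tw).length + 1) = r.drop (tw.length + 1) := by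
              rw [← hr, List.drop_drop]
              congr 1
              simp
              omega
            rw [pvMainA_eq t (i + ('<' :: tw).length + 1) g g2
              (by simp only [List.length_cons]; omega)
              (by
                rw [h1]
                have := List.length_drop (i := tw.length + 1) (l := r)
                omega), hds, h1]
            conv_lhs => rw [hsplit]
            rw [List.drop_length_add_append]
            rfl
      · -- c ≠ '<'
        rw [dif_neg (show ¬(c = '<' ∧ (pvFindGt t t.length i).isSome) by
          rintro ⟨hh, -⟩; exact hlt hh)]
        rw [if_neg (show ¬(c = '<' ∧ r.dropWhile (· ≠ '>') ≠ []) by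
          rintro ⟨hh, -⟩; exact hlt hh)]
        by_cases hq : c = '"'
        · -- literal alternative
          subst hq
          rw [dif_pos (show ('"' : Char) = '"' from rfl)]
          rw [if_pos (show ('"' : Char) = '"' from rfl)]
          rcases hm : pvLitScan r with - | ⟨a, rest⟩
          · -- unterminated: no token, everything consumed
            have hnone := pvLitEnd_none t t.length (i + 1) (Nat.sub_le ..) (by omega)
              (by rw [hr]; exact hm)
            rw [hnone, if_neg (show ¬(t.length < t.length) by omega)]
            rw [pvMainA_eq t t.length g g2 (by omega)
              (by rw [List.drop_length]; simp), List.drop_length, pvScanB_nil]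
          · -- closed literal
            have hsome := pvLitEnd_some t t.length (i + 1) a rest (Nat.sub_le ..) (by omega)
              (by rw [hr]; exact hm)
            rw [hsome.1, if_pos (show i + 1 + a.length < t.length from hsome.2.1)]
            congr 1
            · have harith : i + 1 + a.length - (i + 1) = a.length := by omega
              rw [harith, hsome.2.2.1]
            · rw [pvMainA_eq t (i + 1 + a.length + 1) g g2 (by omega)
                (by
                  rw [← hsome.2.2.2]
                  have := pvLitScan_rest_le r a rest hm
                  omega), ← hsome.2.2.2]
        · rw [dif_neg hq, if_neg hq]
          by_cases hsp : pvIsSpecial c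
          · -- special-character alternative
            rw [dif_pos hsp, if_pos hsp]
            congr 1
            rw [pvMainA_eq t (i + 1) g g2 (by omega) (by rw [hr]; omega), hr]
          · rw [dif_neg hsp, if_neg hsp]
            by_cases hht : c = '^' ∧ r.head? = some '^'
            · -- the ^^ alternative
              have hA2 : c = '^' ∧ i + 1 < t.length ∧ t.getD (i + 1) ' ' = '^' :=
                ⟨hht.1, (hnext '^').mp hht.2⟩
              rw [dif_pos hA2, if_pos hht]
              congr 1
              rw [pvMainA_eq t (i + 2) g g2 (by omega)
                (by
                  rw [List.length_drop]
                  have := List.length_tail (l := r)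
                  rw [← hr, List.length_drop] at this
                  omega), ← hr, List.tail_drop]
            · have hAneg : ¬ (c = '^' ∧ i + 1 < t.length ∧ t.getD (i + 1) ' ' = '^') := by
                rintro ⟨h1, h2, h3⟩
                exact hht ⟨h1, (hnext '^').mpr ⟨h2, h3⟩⟩
              rw [dif_neg hAneg, if_neg hht]
              by_cases hat : c = '@'
              · -- language-tag alternative
                subst hat
                rw [dif_pos (show ('@' : Char) = '@' from rfl)]
                rw [if_pos (show ('@' : Char) = '@' from rfl)]
                have hal := pvAlphaEnd_char t t.length (i + 1) (Nat.sub_le ..)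
                rw [hr] at hal
                congr 1
                · rw [hal]
                  have harith : i + 1 + (r.takeWhile PySem.Chars.isalpha).length - (i + 1)
                      = (r.takeWhile PySem.Chars.isalpha).length := by omega
                  rw [harith, hr, pv_take_takeWhile]
                · have h1 : t.drop (i + 1 + (r.takeWhile PySem.Chars.isalpha).length)
                      = r.dropWhile PySem.Chars.isalpha := by
                    rw [← List.drop_drop, hr, pv_drop_takeWhile]
                  rw [hal, pvMainA_eq t (i + 1 + (r.takeWhile PySem.Chars.isalpha).length) g g2
                    (by omega)
                    (by
                      rw [h1]
                      have := List.length_dropWhile_le (p := PySem.Chars.isalpha) (l := r)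
                      omega), h1]
              · -- name alternative
                rw [dif_neg hat, if_neg hat]
                have hname := pvNameEnd_char t t.length i (Nat.sub_le ..)
                have hnt : pvNameTake (c :: r) = c :: pvNameTake r :=
                  pv_nameTake_cons _ _ hw hsp hht
                rw [hd, hnt] at hname
                have hguard : i + (c :: pvNameTake r).length > i := by simp
                rw [hname, if_pos hguard]
                congr 1
                · have harith : i + (c :: pvNameTake r).length - i
                      = (c :: pvNameTake r).length := by omega
                  rw [hd, harith, ← hnt, pv_take_nameTake (c :: r), hnt]
                · have hdst : t.drop (i + (c :: pvNameTake r).length)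
                      = r.drop (pvNameTake r).length := by
                    rw [← hr, List.drop_drop]
                    congr 1
                    simp
                    omega
                  rw [pvMainA_eq t (i + (c :: pvNameTake r).length) g g2
                    (by simp only [List.length_cons]; omega)
                    (by
                      rw [hdst]
                      have := List.length_drop (i := (pvNameTake r).length) (l := r)
                      omega), hdst]
termination_by t.length - i
decreasing_by all_goals (try simp only [List.length_cons]) <;> omega

-- ===== VERDICT (by name: the statement is the Claim_ definition above) =====
theorem tokenize_turtle_py_spec : Claim_equal_tokenize_turtle_py := by
  intro text _
  unfold Spec_tokenize_turtle_py tokenize_turtle_py tokenize_turtle_py_alt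
  rw [pvMainA_eq text.toList 0 (text.toList.length + 1) text.toList.length (by omega)
    (by rw [List.drop_zero]), List.drop_zero]
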